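-- pv_equiv track=rewrite | github.com/junyong1111/codetree-TILs | 240226/빙산의 일각/the-tip-of-the-iceberg.py | optimized_iceberg_groups
-- ===== SOURCE A (Python) =====
-- def optimized_iceberg_groups(heights):
--     unique_heights = sorted(set(heights), reverse=True)  # 고유 높이 정렬
--     max_groups = 0
--     index = 0  # 현재 높이의 인덱스
--
--     while index < len(unique_heights):
--         water_level = unique_heights[index]
--         groups = 0
--         in_group = False
--         for height in heights:
--             if height > water_level:
--                 if not in_group:
--                     groups += 1
--                     in_group = True
--             else:
--                 in_group = False
--         max_groups = max(max_groups, groups)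
--         index += 1
--
--     return max_groups
-- ===== SOURCE B (Python) =====
-- def optimized_iceberg_groups(heights):
--     # A group at water level w starts exactly at index i with heights[i] > w and
--     # (i == 0 or heights[i-1] <= w), so groups(w) = #{h > w} - #{adjacent-pair mins > w}.
--     mins = [min(a, b) for a, b in zip(heights, heights[1:])]
--     best = 0
--     for w in set(heights):
--         best = max(best, sum(h > w for h in heights) - sum(m > w for m in mins))
--     return best
-- ===== Notes on version B (the rewrite author's own statement) =====
-- stated objective: alternative
-- what changed: Replaces A's per-level stateful scan (an in_group flag walked over the whole list for each water level) by a closed counting formula: group starts are positions where the height exceeds the level but the previous height does not, so groups(w) = count(heights > w) - count(adjacent-pair mins > w); B precomputes the adjacent mins once and takes the max of that formula over the distinct heights, with no sorting and no state machine.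
import Mathlib
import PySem

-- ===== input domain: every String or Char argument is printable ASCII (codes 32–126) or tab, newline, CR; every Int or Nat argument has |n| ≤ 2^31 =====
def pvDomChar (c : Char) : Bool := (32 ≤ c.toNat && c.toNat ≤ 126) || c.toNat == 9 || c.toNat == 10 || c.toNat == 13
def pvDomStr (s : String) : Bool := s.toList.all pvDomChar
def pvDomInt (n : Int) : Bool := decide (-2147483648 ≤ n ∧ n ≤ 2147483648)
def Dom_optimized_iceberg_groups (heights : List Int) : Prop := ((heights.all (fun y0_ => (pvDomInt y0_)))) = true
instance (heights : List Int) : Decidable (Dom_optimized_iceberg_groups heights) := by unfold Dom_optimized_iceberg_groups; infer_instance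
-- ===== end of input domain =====

-- B replaces A's per-level in_group state machine by a closed counting formula over
-- precomputed adjacent-pair minima (alternative decomposition, same asymptotic cost).

-- ===== PORT A =====
-- inner for-loop of A: state (groups, in_group)
def pvStepA (w : Int) (st : Int × Bool) (h : Int) : Int × Bool :=
  if w < h then (if !st.2 then (st.1 + 1, true) else (st.1, true)) else (st.1, false)

def optimized_iceberg_groups (heights : List Int) : Int :=
  let unique_heights := PySem.List.sorted (PySem.Set.ofList heights) (fun x => x) true
  -- while index < len(unique_heights): visits unique_heights in order = fold over the list
  unique_heights.foldl (fun max_groups water_level =>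
    max max_groups (heights.foldl (pvStepA water_level) (0, false)).1) 0

-- ===== PORT B =====
-- sum(x > w for x in l)
def pvCntGt (l : List Int) (w : Int) : Int :=
  (l.map (fun h => if w < h then (1 : Int) else 0)).sum

def optimized_iceberg_groups_alt (heights : List Int) : Int :=
  let mins := (heights.zip heights.tail).map (fun p => min p.1 p.2)
  (PySem.Set.ofList heights).foldl (fun best w =>
    max best (pvCntGt heights w - pvCntGt mins w)) 0

-- ===== PRECONDITION & SPEC =====
def Spec_optimized_iceberg_groups (heights : List Int) (out : Int) : Prop := out = optimized_iceberg_groups_alt heights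
instance (heights : List Int) (out : Int) : Decidable (Spec_optimized_iceberg_groups heights out) := by unfold Spec_optimized_iceberg_groups; infer_instance

-- ===== CLAIM (what is proved, stated in full; the proofs are below) =====
def Claim_equal_optimized_iceberg_groups : Prop := ∀ (heights : List Int), Dom_optimized_iceberg_groups heights → Spec_optimized_iceberg_groups heights (optimized_iceberg_groups heights)

-- ===== LEMMAS AND PROOFS =====

-- the adjacent-pair minima of l
def pvMins (l : List Int) : List Int := (l.zip l.tail).map (fun p => min p.1 p.2)

-- 1 if l starts with an element above w, else 0
def pvHeadGt (l : List Int) (w : Int) : Int :=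
  match l with
  | [] => 0
  | h :: _ => if w < h then 1 else 0

-- loop invariant of A's inner scan: the groups counter counts starts, where a pending
-- in_group flag suppresses a start at the head
lemma pvInner_key (w : Int) : ∀ (l : List Int) (g : Int) (b : Bool),
    (l.foldl (pvStepA w) (g, b)).1
      = g + pvCntGt l w - pvCntGt (pvMins l) w - (if b then pvHeadGt l w else 0) := by
  intro l
  induction l with
  | nil => intro g b; cases b <;> simp [pvCntGt, pvMins, pvHeadGt]
  | cons h t ih =>
    intro g b
    have hstep : ∀ (b : Bool), pvStepA w (g, b) h
        = (if w < h then (if b then g else g + 1) else g, decide (w < h)) := by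
      intro b; cases b <;> by_cases hw : w < h <;> simp [pvStepA, hw]
    cases t with
    | nil =>
      cases b <;> by_cases hw : w < h <;>
        simp [List.foldl_cons, hstep, hw, pvCntGt, pvMins, pvHeadGt]
    | cons h2 t2 =>
      have hc : pvCntGt (h :: h2 :: t2) w = (if w < h then 1 else 0) + pvCntGt (h2 :: t2) w := by
        simp [pvCntGt]
      have hcm : pvCntGt (pvMins (h :: h2 :: t2)) w
          = (if w < min h h2 then 1 else 0) + pvCntGt (pvMins (h2 :: t2)) w := by
        simp [pvMins, pvCntGt]
      rw [List.foldl_cons, hstep b, ih, hc, hcm]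
      simp only [pvHeadGt, lt_min_iff]
      cases b <;> by_cases hw : w < h <;> by_cases hw2 : w < h2 <;>
        simp [hw, hw2] <;> omega

-- A's inner scan computes B's counting formula
lemma pvInner_eq (heights : List Int) (w : Int) :
    (heights.foldl (pvStepA w) (0, false)).1
      = pvCntGt heights w - pvCntGt (pvMins heights) w := by
  rw [pvInner_key w heights 0 false]; simp

-- folding max of a fixed function over a list is permutation-invariant
lemma pvFoldMax_perm (f : Int → Int) {l1 l2 : List Int} (hp : l1.Perm l2) (a : Int) :
    l1.foldl (fun m w => max m (f w)) a = l2.foldl (fun m w => max m (f w)) a := by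
  haveI : RightCommutative (fun (m w : Int) => max m (f w)) :=
    ⟨fun b a1 a2 => by simp [max_assoc, max_comm (f a1) (f a2)]⟩
  exact hp.foldl_eq a

-- ===== VERDICT (by name: the statement is the Claim_ definition above) =====
theorem optimized_iceberg_groups_spec : Claim_equal_optimized_iceberg_groups := by
  intro heights _
  unfold Spec_optimized_iceberg_groups optimized_iceberg_groups optimized_iceberg_groups_alt
  simp only
  have h1 : (PySem.List.sorted (PySem.Set.ofList heights) (fun x => x) true).foldl
      (fun max_groups water_level =>
        max max_groups (heights.foldl (pvStepA water_level) (0, false)).1) 0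
      = (PySem.List.sorted (PySem.Set.ofList heights) (fun x => x) true).foldl
      (fun m w => max m (pvCntGt heights w - pvCntGt (pvMins heights) w)) 0 := by
    apply PySem.List.foldl_congr_mem
    intro acc x _
    rw [pvInner_eq]
  rw [h1, pvFoldMax_perm (fun w => pvCntGt heights w - pvCntGt (pvMins heights) w)
    (PySem.List.sorted_perm (PySem.Set.ofList heights) (fun x => x) true) 0]
  rfl
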